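-- pv_equiv track=rewrite | github.com/Mattiaaa97/Python-journey-2024 | 04_Funzioni_Def_e_Cifratura.py.py | normalizza_spazi
-- ===== SOURCE A (Python) =====
-- def normalizza_spazi(s: str) -> str:
--     r: str = ""
--     i: int = 0
--     spazio: bool = False
--     while i < len(s):
--         if s[i] != " ":
--            r += s[i]
--            spazio = False
--         else:
--             if not spazio:
--                 r += " "
--                 spazio = True
--         i += 1
--     return r.strip()
-- ===== SOURCE B (Python) =====
-- import re
--
-- def normalizza_spazi(s: str) -> str:
--     return re.sub(r" +", " ", s).strip()
-- ===== Notes on version B (the rewrite author's own statement) =====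
-- stated objective: faster
-- what changed: Replaces the index-driven character loop with a space-seen flag and quadratic string concatenation by a single regex substitution collapsing runs of spaces, followed by strip().
import Mathlib
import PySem

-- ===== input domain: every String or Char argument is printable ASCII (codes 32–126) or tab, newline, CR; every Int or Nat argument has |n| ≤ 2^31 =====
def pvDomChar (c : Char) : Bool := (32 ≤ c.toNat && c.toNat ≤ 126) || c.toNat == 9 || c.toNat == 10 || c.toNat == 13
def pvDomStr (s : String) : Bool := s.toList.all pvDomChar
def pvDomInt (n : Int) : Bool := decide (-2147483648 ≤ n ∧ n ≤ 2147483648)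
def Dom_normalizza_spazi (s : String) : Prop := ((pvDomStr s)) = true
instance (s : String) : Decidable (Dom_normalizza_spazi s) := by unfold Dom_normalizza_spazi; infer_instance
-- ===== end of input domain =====

-- B replaces A's indexed loop (with its space-seen flag and quadratic concatenation)
-- by a single regex substitution collapsing each run of spaces to one space, then strip().

-- ===== PORT A =====
-- A's while-loop over indices, transliterated as structural recursion over the
-- remaining characters, carrying the same state (accumulated r, flag spazio).
def pvLoopA : List Char → List Char → Bool → List Char
  | [], r, _ => r
  | c :: rest, r, spazio =>
      if c ≠ ' ' then pvLoopA rest (r ++ [c]) false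
      else if !spazio then pvLoopA rest (r ++ [' ']) true
      else pvLoopA rest r spazio

def normalizza_spazi (s : String) : String :=
  String.ofList (PySem.Chars.strip (pvLoopA s.toList [] false))

-- ===== PORT B =====
-- re.sub(r" +", " ", s): each maximal run of spaces becomes a single space.
def pvCollapse : List Char → List Char
  | [] => []
  | c :: rest =>
      if c = ' ' then ' ' :: pvCollapse (rest.dropWhile (· == ' '))
      else c :: pvCollapse rest
termination_by cs => cs.length
decreasing_by
  · simpa using Nat.lt_succ_of_le (List.length_dropWhile_le (· == ' ') rest)
  · simp

def normalizza_spazi_alt (s : String) : String :=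
  String.ofList (PySem.Chars.strip (pvCollapse s.toList))

-- ===== PRECONDITION & SPEC =====
def Spec_normalizza_spazi (s : String) (out : String) : Prop := out = normalizza_spazi_alt s
instance (s : String) (out : String) : Decidable (Spec_normalizza_spazi s out) := by unfold Spec_normalizza_spazi; infer_instance

-- ===== CLAIM (what is proved, stated in full; the proofs are below) =====
def Claim_equal_normalizza_spazi : Prop := ∀ (s : String), Dom_normalizza_spazi s → Spec_normalizza_spazi s (normalizza_spazi s)

-- ===== LEMMAS AND PROOFS =====
theorem pvLoopA_eq (cs : List Char) : ∀ r : List Char,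
    pvLoopA cs r false = r ++ pvCollapse cs ∧
    pvLoopA cs r true = r ++ pvCollapse (cs.dropWhile (· == ' ')) := by
  induction cs with
  | nil => intro r; simp [pvLoopA, pvCollapse]
  | cons c rest ih =>
      intro r
      by_cases hc : c = ' '
      · subst hc
        constructor
        · simp only [pvLoopA, pvCollapse, ne_eq, not_true_eq_false, if_false,
            Bool.not_false, if_true]
          rw [(ih (r ++ [' '])).2]
          simp
        · simp only [pvLoopA, ne_eq, not_true_eq_false, if_false, Bool.not_true, Bool.false_eq_true]
          rw [(ih r).2]
          simp [List.dropWhile]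
      · constructor
        · simp only [pvLoopA, pvCollapse, ne_eq, hc, not_false_eq_true, if_true]
          rw [(ih (r ++ [c])).1]
          simp
        · simp only [pvLoopA, ne_eq, hc, not_false_eq_true, if_true]
          rw [(ih (r ++ [c])).1]
          have hdw : (c :: rest).dropWhile (· == ' ') = c :: rest := by
            simp [hc]
          rw [hdw]
          simp [pvCollapse, hc]

-- ===== VERDICT (by name: the statement is the Claim_ definition above) =====
theorem normalizza_spazi_spec : Claim_equal_normalizza_spazi := by
  intro s _
  unfold Spec_normalizza_spazi normalizza_spazi normalizza_spazi_alt
  rw [(pvLoopA_eq s.toList []).1]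
  simp
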